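-- pv_equiv track=rewrite | github.com/Tigge/advent-of-code-2015 | day_3.py | walker
-- ===== SOURCE A (Python) =====
-- def walker(inp):
--     house = {(0, 0): True}
--     x = 0
--     y = 0
--     for char in inp:
--         if char == ">":
--             x += 1
--         elif char == "<":
--             x -= 1
--         elif char == "^":
--             y -= 1
--         elif char == "v":
--             y += 1
--         house[(x, y)] = True
--     return house
-- ===== SOURCE B (Python) =====
-- def walker(inp):
--     # staged pipeline: per-axis prefix sums, zip into positions, then first-occurrence collect
--     xs = [0]
--     for c in inp:
--         xs.append(xs[-1] + (1 if c == ">" else -1 if c == "<" else 0))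
--     ys = [0]
--     for c in inp:
--         ys.append(ys[-1] + (1 if c == "v" else -1 if c == "^" else 0))
--     house = {}
--     for p in zip(xs, ys):
--         if p not in house:
--             house[p] = True
--     return house
-- ===== Notes on version B (the rewrite author's own statement) =====
-- stated objective: alternative
-- what changed: Replaces A's single stateful walk that mutates (x,y) and marks the dict inline with a staged pipeline: two independent per-axis prefix-sum passes building the x and y coordinate sequences, a zip into positions, and a final first-occurrence collect pass into the dict.
import Mathlib
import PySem

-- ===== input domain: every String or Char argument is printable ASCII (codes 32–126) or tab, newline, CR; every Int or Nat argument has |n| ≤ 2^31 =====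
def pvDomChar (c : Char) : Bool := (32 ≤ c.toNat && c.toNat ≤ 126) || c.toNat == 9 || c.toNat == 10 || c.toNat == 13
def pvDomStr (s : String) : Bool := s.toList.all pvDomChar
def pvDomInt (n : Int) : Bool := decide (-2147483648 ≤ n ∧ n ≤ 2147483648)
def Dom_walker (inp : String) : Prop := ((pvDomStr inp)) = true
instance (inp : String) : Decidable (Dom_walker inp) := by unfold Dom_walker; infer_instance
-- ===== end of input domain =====

-- B replaces A's single stateful walk-and-mark loop by a staged pipeline: two per-axis prefix-sum
-- passes, a zip into positions, then a first-occurrence collect (alternative decomposition, same O(n) cost).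

-- ===== PORT A =====
def walkerStep (s : PySem.Dict (Int × Int) Bool × Int × Int) (c : Char) :
    PySem.Dict (Int × Int) Bool × Int × Int :=
  let house := s.1
  let x := s.2.1
  let y := s.2.2
  if c = '>' then (house.insert (x + 1, y) true, x + 1, y)
  else if c = '<' then (house.insert (x - 1, y) true, x - 1, y)
  else if c = '^' then (house.insert (x, y - 1) true, x, y - 1)
  else if c = 'v' then (house.insert (x, y + 1) true, x, y + 1)
  else (house.insert (x, y) true, x, y)

def walker (inp : String) : List (Int × Int × Bool) :=
  ((inp.toList.foldl walkerStep (PySem.Dict.ofList [(((0 : Int), (0 : Int)), true)], 0, 0)).1.items).map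
    (fun p => (p.1.1, p.1.2, p.2))

-- ===== PORT B =====
def dxOf (c : Char) : Int := if c = '>' then 1 else if c = '<' then -1 else 0
def dyOf (c : Char) : Int := if c = 'v' then 1 else if c = '^' then -1 else 0

-- one axis pass: xs.append(xs[-1] + d)
def axisStep (dOf : Char → Int) (xs : List Int) (c : Char) : List Int :=
  xs ++ [PySem.List.pyGetD xs (-1) 0 + dOf c]

def collectStep (d : PySem.Dict (Int × Int) Bool) (p : Int × Int) : PySem.Dict (Int × Int) Bool :=
  if d.contains p then d else d.insert p true

def walker_alt (inp : String) : List (Int × Int × Bool) :=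
  ((((inp.toList.foldl (axisStep dxOf) [(0 : Int)]).zip
      (inp.toList.foldl (axisStep dyOf) [(0 : Int)])).foldl collectStep PySem.Dict.empty).items).map
    (fun p => (p.1.1, p.1.2, p.2))

-- ===== PRECONDITION & SPEC =====
def Spec_walker (inp : String) (out : List (Int × Int × Bool)) : Prop := out = walker_alt inp
instance (inp : String) (out : List (Int × Int × Bool)) : Decidable (Spec_walker inp out) := by unfold Spec_walker; infer_instance

-- ===== CLAIM (what is proved, stated in full; the proofs are below) =====
def Claim_equal_walker : Prop := ∀ (inp : String), Dom_walker inp → Spec_walker inp (walker inp)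

-- ===== LEMMAS AND PROOFS =====

-- the sequence of positions visited after each char, starting from (x, y)
def pathFrom (x y : Int) : List Char → List (Int × Int)
  | [] => []
  | c :: l => (x + dxOf c, y + dyOf c) :: pathFrom (x + dxOf c) (y + dyOf c) l

-- what one axis pass appends past its seed
def axisList (dOf : Char → Int) (x : Int) : List Char → List Int
  | [] => []
  | c :: l => (x + dOf c) :: axisList dOf (x + dOf c) l

theorem axis_fold (dOf : Char → Int) (l : List Char) (acc : List Int) (x : Int) :
    l.foldl (axisStep dOf) (acc ++ [x]) = (acc ++ [x]) ++ axisList dOf x l := by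
  induction l generalizing acc x with
  | nil => simp [axisList]
  | cons c l ih =>
    simp only [List.foldl_cons, axisStep, PySem.List.pyGetD_neg_one_append_singleton, axisList]
    rw [ih]
    simp

theorem zip_axis (l : List Char) (x y : Int) :
    (axisList dxOf x l).zip (axisList dyOf y l) = pathFrom x y l := by
  induction l generalizing x y with
  | nil => rfl
  | cons c l ih => simp [axisList, pathFrom, ih]

theorem walkerStep_eq (house : PySem.Dict (Int × Int) Bool) (x y : Int) (c : Char) :
    walkerStep (house, x, y) c =
      (house.insert (x + dxOf c, y + dyOf c) true, x + dxOf c, y + dyOf c) := by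
  simp only [walkerStep, dxOf, dyOf]
  split_ifs <;> simp_all [sub_eq_add_neg]

theorem walker_loop (l : List Char) (house : PySem.Dict (Int × Int) Bool) (x y : Int) :
    (l.foldl walkerStep (house, x, y)).1 =
    (pathFrom x y l).foldl (fun d p => d.insert p true) house := by
  induction l generalizing house x y with
  | nil => rfl
  | cons c l ih =>
    simp only [List.foldl_cons, walkerStep_eq, pathFrom]
    exact ih _ _ _

-- a conditional first-occurrence insert of `true` equals an unconditional insert
-- when every value already stored is `true`
theorem collectStep_eq_insert (d : PySem.Dict (Int × Int) Bool) (p : Int × Int)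
    (h : ∀ w ∈ d.values, w = true) : collectStep d p = d.insert p true := by
  unfold collectStep
  split_ifs with hc
  · apply PySem.Dict.ext
    rw [PySem.Dict.items_insert_of_contains _ _ hc]
    conv_lhs => rw [← List.map_id d.items]
    apply List.map_congr_left
    intro q hq
    by_cases hk : q.1 == p
    · simp only [hk, if_true, id]
      have hv : q.2 = true := h q.2 (List.mem_map_of_mem hq)
      have : q.1 = p := eq_of_beq hk
      cases q; simp_all
    · simp [hk]
  · rfl

theorem values_insert_true (d : PySem.Dict (Int × Int) Bool) (p : Int × Int)
    (h : ∀ w ∈ d.values, w = true) : ∀ w ∈ (d.insert p true).values, w = true := by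
  intro w hw
  rcases PySem.Dict.mem_values_insert d p true w hw with h1 | h2
  · exact h1
  · exact h w h2

theorem collect_eq_insert_fold (ps : List (Int × Int)) (d : PySem.Dict (Int × Int) Bool)
    (h : ∀ w ∈ d.values, w = true) :
    ps.foldl collectStep d = ps.foldl (fun d p => d.insert p true) d := by
  induction ps generalizing d with
  | nil => rfl
  | cons p ps ih =>
    simp only [List.foldl_cons, collectStep_eq_insert d p h]
    exact ih _ (values_insert_true d p h)

-- ===== VERDICT (by name: the statement is the Claim_ definition above) =====
theorem walker_spec : Claim_equal_walker := by
  unfold Claim_equal_walker Spec_walker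
  intro inp _
  unfold walker walker_alt
  have hx := axis_fold dxOf inp.toList [] 0
  have hy := axis_fold dyOf inp.toList [] 0
  simp only [List.nil_append] at hx hy
  rw [walker_loop, hx, hy]
  have hzip : ((0 : Int) :: axisList dxOf 0 inp.toList).zip ((0 : Int) :: axisList dyOf 0 inp.toList)
      = ((0 : Int), (0 : Int)) :: pathFrom 0 0 inp.toList := by
    simp [List.zip_cons_cons, zip_axis]
  simp only [List.singleton_append]
  rw [hzip]
  rw [collect_eq_insert_fold _ _ (by intro w hw; simp [PySem.Dict.empty] at hw)]
  rfl
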